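-- pv_equiv track=rewrite | github.com/chanind/SAE-Probes | sae_probes/activations.py | get_hook_names
-- ===== SOURCE A (Python) =====
-- def get_hook_names(model_name: str, layer: int | None = None) -> list[str]:
--     """
--     Get the hook names for a specific model and optionally a specific layer.
--
--     Args:
--         model_name: Name of the model
--         layer: Layer number (if None, returns hooks for all layers)
--
--     Returns:
--         List of hook names
--     """
--     if model_name == "gemma-2-9b":
--         if layer is not None:
--             return [f"blocks.{layer}.hook_resid_post"]
--         else:
--             return ["hook_embed"] + [
--                 f"blocks.{layer_num}.hook_resid_post" for layer_num in [9, 20, 31, 41]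
--             ]
--     elif model_name == "llama-3.1-8b":
--         if layer is not None:
--             return [f"blocks.{layer}.hook_resid_post"]
--         else:
--             return ["hook_embed"] + [
--                 f"blocks.{layer_num}.hook_resid_post" for layer_num in [8, 16, 24, 31]
--             ]
--     elif model_name == "gemma-2-2b":
--         if layer is not None:
--             return [f"blocks.{layer}.hook_resid_post"]
--         else:
--             return ["hook_embed"] + [
--                 f"blocks.{layer}.hook_resid_post" for layer in [12]
--             ]
--     else:
--         raise ValueError(f"Model {model_name} not supported")
-- ===== SOURCE B (Python) =====
-- _SPEC = "gemma-2-9b:9,20,31,41;llama-3.1-8b:8,16,24,31;gemma-2-2b:12"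
--
--
-- def get_hook_names(model_name: str, layer: int | None = None) -> list[str]:
--     for entry in _SPEC.split(";"):
--         name, nums = entry.split(":")
--         if name == model_name:
--             if layer is not None:
--                 return [f"blocks.{layer}.hook_resid_post"]
--             return ["hook_embed"] + [
--                 f"blocks.{n}.hook_resid_post" for n in nums.split(",")
--             ]
--     raise ValueError(f"Model {model_name} not supported")
-- ===== Notes on version B (the rewrite author's own statement) =====
-- stated objective: alternative
-- what changed: Replaces A's three repeated if-elif branches with a single config string that is parsed and linearly scanned for the model's entry, formatting the hook names from the parsed layer substrings.
import Mathlib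
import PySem

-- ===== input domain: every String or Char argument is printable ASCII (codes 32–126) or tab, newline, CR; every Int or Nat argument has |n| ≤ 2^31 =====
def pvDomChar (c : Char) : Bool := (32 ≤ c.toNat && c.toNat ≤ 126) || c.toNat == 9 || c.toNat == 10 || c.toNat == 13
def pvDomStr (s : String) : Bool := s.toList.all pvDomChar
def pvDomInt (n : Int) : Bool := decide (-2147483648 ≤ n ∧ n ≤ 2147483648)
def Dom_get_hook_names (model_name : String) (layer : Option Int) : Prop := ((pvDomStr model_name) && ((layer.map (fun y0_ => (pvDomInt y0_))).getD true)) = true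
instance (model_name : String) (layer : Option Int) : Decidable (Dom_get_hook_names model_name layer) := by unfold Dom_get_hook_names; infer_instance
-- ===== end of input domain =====

-- B stores the model/layer data as one config string parsed at need and found by a
-- linear scan over its entries, instead of A's three repeated if-elif branches
-- (objective: alternative). Proved equal on the supported models.

-- ===== PORT A =====
-- f"blocks.{x}.hook_resid_post" (x an int); exact: PySem.Int.toStr = Python str(int)
def pvHookA (x : Int) : String := "blocks." ++ PySem.Int.toStr x ++ ".hook_resid_post"

def get_hook_names (model_name : String) (layer : Option Int) : List String :=
  if model_name = "gemma-2-9b" then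
    match layer with
    | some l => [pvHookA l]
    | none => ["hook_embed"] ++ ([9, 20, 31, 41] : List Int).map (fun layer_num => pvHookA layer_num)
  else if model_name = "llama-3.1-8b" then
    match layer with
    | some l => [pvHookA l]
    | none => ["hook_embed"] ++ ([8, 16, 24, 31] : List Int).map (fun layer_num => pvHookA layer_num)
  else if model_name = "gemma-2-2b" then
    match layer with
    | some l => [pvHookA l]
    | none => ["hook_embed"] ++ ([12] : List Int).map (fun layer_ => pvHookA layer_)
  else
    []  -- raise ValueError: unreachable under Pre_get_hook_names

-- ===== PORT B =====
def pvSpec : String := "gemma-2-9b:9,20,31,41;llama-3.1-8b:8,16,24,31;gemma-2-2b:12"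

-- f"blocks.{n}.hook_resid_post" where n is the substring taken from the config string
def pvHookStr (n : String) : String := "blocks." ++ n ++ ".hook_resid_post"

-- the for-loop over _SPEC.split(";"): scan the entries, first matching name wins
def pvScan (model_name : String) (layer : Option Int) : List String → List String
  | [] => []  -- raise ValueError: unreachable under Pre_get_hook_names
  | entry :: rest =>
    let parts := (PySem.Str.split? entry ":").getD []
    let name := parts.getD 0 ""
    let nums := parts.getD 1 ""
    if name = model_name then
      match layer with
      | some l => ["blocks." ++ PySem.Int.toStr l ++ ".hook_resid_post"]
      | none => ["hook_embed"] ++ ((PySem.Str.split? nums ",").getD []).map pvHookStr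
    else pvScan model_name layer rest

def get_hook_names_alt (model_name : String) (layer : Option Int) : List String :=
  pvScan model_name layer ((PySem.Str.split? pvSpec ";").getD [])

-- ===== PRECONDITION & SPEC =====
-- A raises ValueError on any other model_name; exactly those inputs are excluded.
def Pre_get_hook_names (model_name : String) (layer : Option Int) : Prop :=
  model_name = "gemma-2-9b" ∨ model_name = "llama-3.1-8b" ∨ model_name = "gemma-2-2b"
instance (model_name : String) (layer : Option Int) : Decidable (Pre_get_hook_names model_name layer) := by unfold Pre_get_hook_names; infer_instance

def pvWitness_get_hook_names : String × Option Int := ("gemma-2-2b", some 12)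

def Spec_get_hook_names (model_name : String) (layer : Option Int) (out : List String) : Prop := out = get_hook_names_alt model_name layer
instance (model_name : String) (layer : Option Int) (out : List String) : Decidable (Spec_get_hook_names model_name layer out) := by unfold Spec_get_hook_names; infer_instance

-- ===== CLAIM (what is proved, stated in full; the proofs are below) =====
def Claim_equal_get_hook_names : Prop := ∀ (model_name : String) (layer : Option Int), Dom_get_hook_names model_name layer → Pre_get_hook_names model_name layer → Spec_get_hook_names model_name layer (get_hook_names model_name layer)

-- ===== LEMMAS AND PROOFS =====
-- the config string parses to exactly these three entries
theorem pvSpec_entries : (PySem.Str.split? pvSpec ";").getD [] =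
    ["gemma-2-9b:9,20,31,41", "llama-3.1-8b:8,16,24,31", "gemma-2-2b:12"] := by decide

-- ===== VERDICT (by name: the statement is the Claim_ definition above) =====
theorem get_hook_names_spec : Claim_equal_get_hook_names := by
  intro model_name layer _ hpre
  rcases hpre with h | h | h <;> subst h <;>
    cases layer <;>
      simp [Spec_get_hook_names, get_hook_names, get_hook_names_alt, pvSpec_entries,
        pvScan, pvHookA] <;> decide
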